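-- pv_equiv track=rewrite | github.com/ValentinaGMoreno/parcial.recuperatorio | funcion_parcial2.py | row_check
-- ===== SOURCE A (Python) =====
-- def row_check (dna):  #Chequeo de fila
--     row_counter = 0
--     for i in range(6):
--         for j in range(3):
--             if dna[i][j]==dna[i][j+1] and dna[i][j]==dna[i][j+2] and dna[i][j]==dna[i][j+3]:
--                 row_counter = row_counter + 1
--                 break
--     return row_counter
-- ===== SOURCE B (Python) =====
-- def row_check(dna):
--     count = 0
--     for i in range(6):
--         cells = dna[i][:6]
--         streak = 1
--         for j in range(1, len(cells)):
--             streak = streak + 1 if cells[j - 1] == cells[j] else 1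
--             if streak == 4:
--                 count += 1
--                 break
--     return count
-- ===== Notes on version B (the rewrite author's own statement) =====
-- stated objective: alternative
-- what changed: Replaces A's three overlapping fixed-window equality probes per row with a single left-to-right run-length (streak) scan over the row's first 6 cells.
import Mathlib
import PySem

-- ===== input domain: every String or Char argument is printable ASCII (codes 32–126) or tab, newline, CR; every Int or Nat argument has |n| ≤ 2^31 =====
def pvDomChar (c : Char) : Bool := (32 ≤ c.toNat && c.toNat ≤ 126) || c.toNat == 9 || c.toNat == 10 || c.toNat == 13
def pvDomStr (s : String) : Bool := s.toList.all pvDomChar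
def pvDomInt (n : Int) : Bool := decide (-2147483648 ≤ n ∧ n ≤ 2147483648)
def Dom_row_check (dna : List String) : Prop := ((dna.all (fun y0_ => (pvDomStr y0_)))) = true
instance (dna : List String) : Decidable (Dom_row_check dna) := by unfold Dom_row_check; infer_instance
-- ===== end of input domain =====

set_option maxRecDepth 8000
set_option maxHeartbeats 1000000


-- B replaces A's three overlapping fixed-window probes per row with a single left-to-right
-- run-length (streak) scan of the row's first 6 cells (objective: alternative, same cost).

-- dna[i][j] on the exact indices used (total helper; out of range gives a junk ' ' that the
-- claims never rely on: Pre_ keeps Python A's evaluation in range)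
def pvCell (dna : List String) (i j : Int) : Char :=
  ((PySem.List.pyGet? dna i).bind (fun s => PySem.Str.pyGet? s j)).getD ' '

-- ===== PORT A =====
-- inner 'for j in range(3): if …: row_counter += 1; break' = first matching j counts once
def pvHitA (dna : List String) (i : Int) : Bool :=
  (PySem.List.pyRange 0 3 1).any (fun j =>
    pvCell dna i j == pvCell dna i (j+1) &&
    pvCell dna i j == pvCell dna i (j+2) &&
    pvCell dna i j == pvCell dna i (j+3))

def row_check (dna : List String) : Int :=
  (PySem.List.pyRange 0 6 1).foldl
    (fun row_counter i => if pvHitA dna i then row_counter + 1 else row_counter) 0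

-- ===== PORT B =====
-- streak loop over j = 1 .. len(cells)-1 with break when the streak reaches 4
def pvStreakLoop (cells : List Char) : List Int → Int → Bool
  | [], _ => false
  | j :: js, streak =>
    let streak' :=
      if (PySem.List.pyGet? cells (j-1)).getD ' ' == (PySem.List.pyGet? cells j).getD ' '
      then streak + 1 else 1
    if streak' == 4 then true else pvStreakLoop cells js streak'

def pvHitB (dna : List String) (i : Int) : Bool :=
  let cells := PySem.List.slice ((PySem.List.pyGet? dna i).getD "").toList none (some 6)
  pvStreakLoop cells (PySem.List.pyRange 1 cells.length 1) 1

def row_check_alt (dna : List String) : Int :=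
  (PySem.List.pyRange 0 6 1).foldl
    (fun count i => if pvHitB dna i then count + 1 else count) 0

-- ===== PRECONDITION & SPEC =====
-- windows of A on a row (Bool form over total lookups)
def pvM0 (l : List Char) : Bool := l[0]? == l[1]? && l[0]? == l[2]? && l[0]? == l[3]?
def pvM1 (l : List Char) : Bool := l[1]? == l[2]? && l[1]? == l[3]? && l[1]? == l[4]?

-- exactly the rows on which A's short-circuit evaluation never indexes out of range:
-- length ≥ 6 always; length 5 unless it reaches j=2 with s[2]=s[3]=s[4]; length 4 only if
-- the j=0 window matches, or j=1 and j=2 stop before their out-of-range operand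
def pvSafeRow (l : List Char) : Bool :=
  decide (6 ≤ l.length) ||
  (l.length == 5 && (pvM0 l || pvM1 l || !(l[2]? == l[3]? && l[2]? == l[4]?))) ||
  (l.length == 4 && (pvM0 l || (!(l[1]? == l[2]? && l[1]? == l[3]?) && !(l[2]? == l[3]?))))

-- Pre_ = exactly the inputs on which Python A returns normally (A raises IndexError on any
-- other input: fewer than 6 rows, or an unsafe short row among the first 6)
def Pre_row_check (dna : List String) : Prop :=
  6 ≤ dna.length ∧ ∀ s ∈ dna.take 6, pvSafeRow s.toList = true
instance (dna : List String) : Decidable (Pre_row_check dna) := by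
  unfold Pre_row_check; infer_instance

def pvWitness_row_check : List String :=
  ["aaaaab", "abcd", "xxxxxx", "ababa", "zzzzab", "aazzzz"]

def Spec_row_check (dna : List String) (out : Int) : Prop := out = row_check_alt dna
instance (dna : List String) (out : Int) : Decidable (Spec_row_check dna out) := by
  unfold Spec_row_check; infer_instance

-- ===== CLAIM (what is proved, stated in full; the proofs are below) =====
def Claim_equal_row_check : Prop :=
  ∀ (dna : List String), Dom_row_check dna → Pre_row_check dna → Spec_row_check dna (row_check dna)

-- ===== LEMMAS AND PROOFS =====

-- per-row core: on a safe row, A's window probes agree with B's streak scan (list form)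
theorem pvCore (l : List Char) (hsafe : pvSafeRow l = true) :
    ((l[0]?.getD ' ' == l[1]?.getD ' ' && l[0]?.getD ' ' == l[2]?.getD ' ' &&
      l[0]?.getD ' ' == l[3]?.getD ' ') ||
     ((l[1]?.getD ' ' == l[2]?.getD ' ' && l[1]?.getD ' ' == l[3]?.getD ' ' &&
       l[1]?.getD ' ' == l[4]?.getD ' ') ||
      ((l[2]?.getD ' ' == l[3]?.getD ' ' && l[2]?.getD ' ' == l[4]?.getD ' ' &&
        l[2]?.getD ' ' == l[5]?.getD ' ') || false)))
    = pvStreakLoop (l.take 6) (PySem.List.pyRange 1 ((l.take 6).length : Int) 1) 1 := by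
  match l with
  | [] | [_] | [_,_] | [_,_,_] =>
    simp [pvSafeRow, pvM0, pvM1] at hsafe
  | [c0,c1,c2,c3] =>
    simp [pvSafeRow, pvM0, pvM1] at hsafe
    have e : ([c0,c1,c2,c3] : List Char).take 6 = [c0,c1,c2,c3] :=
      List.take_of_length_le (by simp)
    rw [e, (by norm_num : ((([c0,c1,c2,c3] : List Char).length : Int)) = 4),
        (by decide : PySem.List.pyRange 1 (4:Int) 1 = [1,2,3])]
    have b1 : (PySem.List.pyGet? ([c0,c1,c2,c3] : List Char) 1).getD ' ' = c1 := rfl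
    have b10 : (PySem.List.pyGet? ([c0,c1,c2,c3] : List Char) (1-1)).getD ' ' = c0 := rfl
    have b2 : (PySem.List.pyGet? ([c0,c1,c2,c3] : List Char) 2).getD ' ' = c2 := rfl
    have b21 : (PySem.List.pyGet? ([c0,c1,c2,c3] : List Char) (2-1)).getD ' ' = c1 := rfl
    have b3 : (PySem.List.pyGet? ([c0,c1,c2,c3] : List Char) 3).getD ' ' = c3 := rfl
    have b32 : (PySem.List.pyGet? ([c0,c1,c2,c3] : List Char) (3-1)).getD ' ' = c2 := rfl
    simp only [pvStreakLoop, b1, b10, b2, b21, b3, b32]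
    have a0 : (([c0,c1,c2,c3] : List Char)[0]?).getD ' ' = c0 := rfl
    have a1 : (([c0,c1,c2,c3] : List Char)[1]?).getD ' ' = c1 := rfl
    have a2 : (([c0,c1,c2,c3] : List Char)[2]?).getD ' ' = c2 := rfl
    have a3 : (([c0,c1,c2,c3] : List Char)[3]?).getD ' ' = c3 := rfl
    have a4 : (([c0,c1,c2,c3] : List Char)[4]?).getD ' ' = ' ' := rfl
    have a5 : (([c0,c1,c2,c3] : List Char)[5]?).getD ' ' = ' ' := rfl
    simp only [a0, a1, a2, a3, a4, a5]
    split_ifs <;> simp_all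
  | [c0,c1,c2,c3,c4] =>
    simp [pvSafeRow, pvM0, pvM1] at hsafe
    have e : ([c0,c1,c2,c3,c4] : List Char).take 6 = [c0,c1,c2,c3,c4] :=
      List.take_of_length_le (by simp)
    rw [e, (by norm_num : ((([c0,c1,c2,c3,c4] : List Char).length : Int)) = 5),
        (by decide : PySem.List.pyRange 1 (5:Int) 1 = [1,2,3,4])]
    have b1 : (PySem.List.pyGet? ([c0,c1,c2,c3,c4] : List Char) 1).getD ' ' = c1 := rfl
    have b10 : (PySem.List.pyGet? ([c0,c1,c2,c3,c4] : List Char) (1-1)).getD ' ' = c0 := rfl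
    have b2 : (PySem.List.pyGet? ([c0,c1,c2,c3,c4] : List Char) 2).getD ' ' = c2 := rfl
    have b21 : (PySem.List.pyGet? ([c0,c1,c2,c3,c4] : List Char) (2-1)).getD ' ' = c1 := rfl
    have b3 : (PySem.List.pyGet? ([c0,c1,c2,c3,c4] : List Char) 3).getD ' ' = c3 := rfl
    have b32 : (PySem.List.pyGet? ([c0,c1,c2,c3,c4] : List Char) (3-1)).getD ' ' = c2 := rfl
    have b4 : (PySem.List.pyGet? ([c0,c1,c2,c3,c4] : List Char) 4).getD ' ' = c4 := rfl
    have b43 : (PySem.List.pyGet? ([c0,c1,c2,c3,c4] : List Char) (4-1)).getD ' ' = c3 := rfl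
    simp only [pvStreakLoop, b1, b10, b2, b21, b3, b32, b4, b43]
    have a0 : (([c0,c1,c2,c3,c4] : List Char)[0]?).getD ' ' = c0 := rfl
    have a1 : (([c0,c1,c2,c3,c4] : List Char)[1]?).getD ' ' = c1 := rfl
    have a2 : (([c0,c1,c2,c3,c4] : List Char)[2]?).getD ' ' = c2 := rfl
    have a3 : (([c0,c1,c2,c3,c4] : List Char)[3]?).getD ' ' = c3 := rfl
    have a4 : (([c0,c1,c2,c3,c4] : List Char)[4]?).getD ' ' = c4 := rfl
    have a5 : (([c0,c1,c2,c3,c4] : List Char)[5]?).getD ' ' = ' ' := rfl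
    simp only [a0, a1, a2, a3, a4, a5]
    split_ifs <;> simp_all
  | c0 :: c1 :: c2 :: c3 :: c4 :: c5 :: t =>
    have e : (c0 :: c1 :: c2 :: c3 :: c4 :: c5 :: t).take 6 = [c0,c1,c2,c3,c4,c5] := by
      rfl
    rw [e, (by norm_num : ((([c0,c1,c2,c3,c4,c5] : List Char).length : Int)) = 6),
        (by decide : PySem.List.pyRange 1 (6:Int) 1 = [1,2,3,4,5])]
    have b1 : (PySem.List.pyGet? ([c0,c1,c2,c3,c4,c5] : List Char) 1).getD ' ' = c1 := rfl
    have b10 : (PySem.List.pyGet? ([c0,c1,c2,c3,c4,c5] : List Char) (1-1)).getD ' ' = c0 := rfl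
    have b2 : (PySem.List.pyGet? ([c0,c1,c2,c3,c4,c5] : List Char) 2).getD ' ' = c2 := rfl
    have b21 : (PySem.List.pyGet? ([c0,c1,c2,c3,c4,c5] : List Char) (2-1)).getD ' ' = c1 := rfl
    have b3 : (PySem.List.pyGet? ([c0,c1,c2,c3,c4,c5] : List Char) 3).getD ' ' = c3 := rfl
    have b32 : (PySem.List.pyGet? ([c0,c1,c2,c3,c4,c5] : List Char) (3-1)).getD ' ' = c2 := rfl
    have b4 : (PySem.List.pyGet? ([c0,c1,c2,c3,c4,c5] : List Char) 4).getD ' ' = c4 := rfl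
    have b43 : (PySem.List.pyGet? ([c0,c1,c2,c3,c4,c5] : List Char) (4-1)).getD ' ' = c3 := rfl
    have b5 : (PySem.List.pyGet? ([c0,c1,c2,c3,c4,c5] : List Char) 5).getD ' ' = c5 := rfl
    have b54 : (PySem.List.pyGet? ([c0,c1,c2,c3,c4,c5] : List Char) (5-1)).getD ' ' = c4 := rfl
    simp only [pvStreakLoop, b1, b10, b2, b21, b3, b32, b4, b43, b5, b54]
    have a0 : ((c0 :: c1 :: c2 :: c3 :: c4 :: c5 :: t)[0]?).getD ' ' = c0 := rfl
    have a1 : ((c0 :: c1 :: c2 :: c3 :: c4 :: c5 :: t)[1]?).getD ' ' = c1 := rfl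
    have a2 : ((c0 :: c1 :: c2 :: c3 :: c4 :: c5 :: t)[2]?).getD ' ' = c2 := rfl
    have a3 : ((c0 :: c1 :: c2 :: c3 :: c4 :: c5 :: t)[3]?).getD ' ' = c3 := rfl
    have a4 : ((c0 :: c1 :: c2 :: c3 :: c4 :: c5 :: t)[4]?).getD ' ' = c4 := rfl
    have a5 : ((c0 :: c1 :: c2 :: c3 :: c4 :: c5 :: t)[5]?).getD ' ' = c5 := rfl
    simp only [a0, a1, a2, a3, a4, a5]
    clear hsafe b1 b10 b2 b21 b3 b32 b4 b43 b5 b54 a0 a1 a2 a3 a4 a5 e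
    split_ifs <;> simp_all

-- per-row: lift pvCore through the ports' row access
theorem pvHit_eq (dna : List String) (i : Int) (s : String)
    (hs : PySem.List.pyGet? dna i = some s) (hsafe : pvSafeRow s.toList = true) :
    pvHitA dna i = pvHitB dna i := by
  have hget : ∀ (k : Nat), pvCell dna i (k : Int) = (s.toList[k]?).getD ' ' := by
    intro k
    simp [pvCell, hs, PySem.Str.pyGet?_eq, PySem.List.pyGet?_of_nonneg _ (by omega : (0:Int) ≤ k)]
  have hrange3 : PySem.List.pyRange 0 3 1 = [0, 1, 2] := by decide
  have hA : pvHitA dna i =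
      ((s.toList[0]?.getD ' ' == s.toList[1]?.getD ' ' &&
        s.toList[0]?.getD ' ' == s.toList[2]?.getD ' ' &&
        s.toList[0]?.getD ' ' == s.toList[3]?.getD ' ') ||
       ((s.toList[1]?.getD ' ' == s.toList[2]?.getD ' ' &&
         s.toList[1]?.getD ' ' == s.toList[3]?.getD ' ' &&
         s.toList[1]?.getD ' ' == s.toList[4]?.getD ' ') ||
        ((s.toList[2]?.getD ' ' == s.toList[3]?.getD ' ' &&
          s.toList[2]?.getD ' ' == s.toList[4]?.getD ' ' &&
          s.toList[2]?.getD ' ' == s.toList[5]?.getD ' ') || false))) := by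
    unfold pvHitA
    rw [hrange3]
    simp only [List.any_cons, List.any_nil]
    have g0 := hget 0; have g1 := hget 1; have g2 := hget 2
    have g3 := hget 3; have g4 := hget 4; have g5 := hget 5
    norm_num at g0 g1 g2 g3 g4 g5
    norm_num [g0, g1, g2, g3, g4, g5]
  have hB : pvHitB dna i =
      pvStreakLoop (s.toList.take 6)
        (PySem.List.pyRange 1 ((s.toList.take 6).length : Int) 1) 1 := by
    unfold pvHitB
    simp [hs, PySem.List.slice_to]
  rw [hA, hB]
  exact pvCore s.toList hsafe

-- ===== VERDICT (by name: the statement is the Claim_ definition above) =====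
theorem row_check_spec : Claim_equal_row_check := by
  intro dna _ hpre
  obtain ⟨hlen, hrows⟩ := hpre
  unfold Spec_row_check row_check row_check_alt
  have hr : PySem.List.pyRange 0 6 1 = [0, 1, 2, 3, 4, 5] := by decide
  rw [hr]
  have hhit : ∀ (k : Nat), k < 6 → pvHitA dna (k : Int) = pvHitB dna (k : Int) := by
    intro k hk
    have hk' : k < dna.length := by omega
    refine pvHit_eq dna k dna[k] ?_ ?_
    · simp [PySem.List.pyGet?_natCast]
    · exact hrows _ (List.mem_take_iff_getElem.mpr ⟨k, by omega, by simp⟩)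
  have h0 := hhit 0 (by omega); have h1 := hhit 1 (by omega)
  have h2 := hhit 2 (by omega); have h3 := hhit 3 (by omega)
  have h4 := hhit 4 (by omega); have h5 := hhit 5 (by omega)
  norm_num at h0 h1 h2 h3 h4 h5
  simp [List.foldl, h0, h1, h2, h3, h4, h5]
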